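-- pv_equiv track=rewrite | github.com/ciaranmccormick/advent-of-code-2019 | 4/main.py | part_two
-- ===== SOURCE A (Python) =====
-- from typing import List
--
-- def contains_more_than_two_repeats(password: str) -> bool:
--     """Checks if password has characters that have more than 2 consecutive repeats."""
--
--     prev_digit = password[0]
--     password = password[1:]
--     repeat = 0
--     for digit in password:
--         if prev_digit == digit:
--             repeat += 1
--         else:
--             repeat = 0
--
--         if repeat > 1:
--             return True
--
--         prev_digit = digit
--
--     return False
--
-- def contains_two_repeats_only(password: str) -> bool:
--     """Returns 2 if password has only 2 consecutive repeats."""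
--     prev = ""
--     count = 1
--     for digit in password:
--         if prev == digit:
--             count += 1
--         else:
--             if count == 2:
--                 break
--             count = 1
--         prev = digit
--
--     if count == 2:
--         return True
--     return False
--
-- def part_two(passwords: List[str]) -> List[str]:
--     passwords = [
--         password
--         for password in passwords
--         if not contains_more_than_two_repeats(password)
--         or contains_two_repeats_only(password)
--     ]
--     return passwords
-- ===== SOURCE B (Python) =====
-- from typing import List
--
-- def _run_lengths(password: str) -> List[int]:
--     """Lengths of maximal runs of consecutive equal characters (IndexError on '')."""
--     runs = []
--     cur = password[0]
--     n = 1
--     for c in password[1:]: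
--         if c == cur:
--             n += 1
--         else:
--             runs.append(n)
--             cur = c
--             n = 1
--     runs.append(n)
--     return runs
--
-- def part_two(passwords: List[str]) -> List[str]:
--     result = []
--     for password in passwords:
--         runs = _run_lengths(password)
--         if all(r < 3 for r in runs) or any(r == 2 for r in runs):
--             result.append(password)
--     return result
-- ===== Notes on version B (the rewrite author's own statement) =====
-- stated objective: simpler
-- what changed: Replaces A's two separate stateful scanners (an early-return repeat counter and a break-on-count==2 loop) with a single run-length-encoding pass per password followed by a plain predicate over the run lengths.
import Mathlib
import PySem

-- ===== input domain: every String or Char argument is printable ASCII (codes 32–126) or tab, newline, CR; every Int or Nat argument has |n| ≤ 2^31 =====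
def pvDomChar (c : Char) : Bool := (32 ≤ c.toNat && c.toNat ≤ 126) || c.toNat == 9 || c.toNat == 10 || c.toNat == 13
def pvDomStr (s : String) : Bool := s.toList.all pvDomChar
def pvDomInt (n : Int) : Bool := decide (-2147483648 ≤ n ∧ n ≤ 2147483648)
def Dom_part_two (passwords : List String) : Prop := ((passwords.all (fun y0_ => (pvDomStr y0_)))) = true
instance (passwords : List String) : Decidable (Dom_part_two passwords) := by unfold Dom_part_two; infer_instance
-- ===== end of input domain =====

-- B replaces A's two stateful scanners with one run-length pass plus a plain predicate (objective: simpler).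

-- ===== PORT A =====
-- loop of contains_more_than_two_repeats: prev_digit, repeat, remaining chars
def pvLoopMore (prev : Char) (rep : Int) : List Char → Bool
  | [] => false
  | d :: rest =>
    let rep' := if prev == d then rep + 1 else 0
    if rep' > 1 then true else pvLoopMore d rep' rest

-- contains_more_than_two_repeats; '' raises IndexError in Python (excluded by Pre_)
def containsMoreThanTwoRepeats (password : String) : Bool :=
  match password.toList with
  | [] => false
  | d :: rest => pvLoopMore d 0 rest

-- loop of contains_two_repeats_only: prev starts as "" (modelled Option Char), returns final count
def pvLoopOnly (prev : Option Char) (count : Int) : List Char → Int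
  | [] => count
  | d :: rest =>
    if prev == some d then pvLoopOnly (some d) (count + 1) rest
    else if count == 2 then count            -- break
    else pvLoopOnly (some d) 1 rest

def containsTwoRepeatsOnly (password : String) : Bool :=
  pvLoopOnly none 1 password.toList == 2

def part_two (passwords : List String) : List String :=
  passwords.filter (fun password =>
    !containsMoreThanTwoRepeats password || containsTwoRepeatsOnly password)

-- ===== PORT B =====
-- _run_lengths loop: current char, current count, remaining chars
def pvRunsLoop (cur : Char) (n : Int) : List Char → List Int
  | [] => [n]
  | c :: rest => if c == cur then pvRunsLoop cur (n + 1) rest else n :: pvRunsLoop c 1 rest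

-- _run_lengths; '' raises IndexError in Python (excluded by Pre_)
def runLengths (password : String) : List Int :=
  match password.toList with
  | [] => []
  | c :: rest => pvRunsLoop c 1 rest

def part_two_alt (passwords : List String) : List String :=
  passwords.filter (fun password =>
    (runLengths password).all (fun r => r < 3) || (runLengths password).any (fun r => r == 2))

-- ===== PRECONDITION & SPEC =====
-- Pre_ excludes lists containing an empty string: there both A and B raise IndexError (password[0]).
def Pre_part_two (passwords : List String) : Prop := ∀ p ∈ passwords, p ≠ ""
instance (passwords : List String) : Decidable (Pre_part_two passwords) := by unfold Pre_part_two; infer_instance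

def pvWitness_part_two : List String := ["112233", "123444", "111122"]

def Spec_part_two (passwords : List String) (out : List String) : Prop := out = part_two_alt passwords
instance (passwords : List String) (out : List String) : Decidable (Spec_part_two passwords out) := by unfold Spec_part_two; infer_instance

-- ===== CLAIM (what is proved, stated in full; the proofs are below) =====
def Claim_equal_part_two : Prop := ∀ (passwords : List String), Dom_part_two passwords → Pre_part_two passwords → Spec_part_two passwords (part_two passwords)

-- ===== LEMMAS AND PROOFS =====

-- first run length only grows: once ≥ 3 some run length ≥ 3
theorem pvRunsLoop_any_ge (rest : List Char) : ∀ (cur : Char) (n : Int), 3 ≤ n →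
    (pvRunsLoop cur n rest).any (fun r => 3 ≤ r) = true := by
  induction rest with
  | nil => intro cur n h; simp [pvRunsLoop]; omega
  | cons c rest ih =>
    intro cur n h
    simp only [pvRunsLoop]
    split
    · exact ih cur (n + 1) (by omega)
    · simp; left; omega

theorem pvLoopMore_eq (rest : List Char) : ∀ (cur : Char) (rep : Int), rep ≤ 1 → 0 ≤ rep →
    pvLoopMore cur rep rest = (pvRunsLoop cur (rep + 1) rest).any (fun r => 3 ≤ r) := by
  induction rest with
  | nil => intro cur rep h h0; simp [pvLoopMore, pvRunsLoop]; omega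
  | cons d rest ih =>
    intro cur rep h h0
    simp only [pvLoopMore, pvRunsLoop]
    by_cases hd : cur = d
    · subst hd
      simp only [beq_self_eq_true, if_pos]
      by_cases h1 : rep + 1 > 1
      · rw [if_pos h1]
        exact (pvRunsLoop_any_ge rest cur (rep + 1 + 1) (by omega)).symm
      · rw [if_neg h1]
        exact ih cur (rep + 1) (by omega) (by omega)
    · have h1 : (cur == d) = false := beq_eq_false_iff_ne.mpr hd
      have h2 : (d == cur) = false := beq_eq_false_iff_ne.mpr (Ne.symm hd)
      simp only [h1, h2, Bool.false_eq_true, if_false]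
      rw [if_neg (by omega : ¬ ((0:Int) > 1))]
      rw [ih d 0 (by omega) (by omega)]
      simp; omega

theorem pvLoopOnly_eq (rest : List Char) : ∀ (cur : Char) (n : Int),
    (pvLoopOnly (some cur) n rest == 2) = (pvRunsLoop cur n rest).any (fun r => r == 2) := by
  induction rest with
  | nil => intro cur n; simp [pvLoopOnly, pvRunsLoop]
  | cons d rest ih =>
    intro cur n
    simp only [pvLoopOnly, pvRunsLoop]
    by_cases hd : cur = d
    · subst hd
      simp only [beq_self_eq_true, if_pos]
      exact ih cur (n + 1)
    · have h1 : (some cur == some d) = false := by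
        simp [beq_eq_false_iff_ne.mpr hd]
      have h2 : (d == cur) = false := beq_eq_false_iff_ne.mpr (Ne.symm hd)
      simp only [h1, h2, Bool.false_eq_true, if_false]
      by_cases h3 : n = 2
      · subst h3
        rw [if_pos (by decide : ((2:Int) == 2) = true)]
        simp
      · have h4' : (n == 2) = false := beq_eq_false_iff_ne.mpr h3
        rw [if_neg (by simp [h4'])]
        rw [ih d 1]
        have h4 : (n == 2) = false := beq_eq_false_iff_ne.mpr h3
        simp [h4]

theorem not_any_ge_eq_all_lt (l : List Int) :
    (!(l.any fun r => 3 ≤ r)) = l.all (fun r => r < 3) := by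
  induction l with
  | nil => simp
  | cons r rs ih =>
    by_cases h : (3:Int) ≤ r
    · have h2 : ¬ (r < 3) := by omega
      simp [List.any_cons, List.all_cons, h, h2]
    · have h2 : r < 3 := by omega
      simp [List.any_cons, List.all_cons, h, h2, ← ih]

theorem pred_eq (p : String) (hne : p ≠ "") :
    (!containsMoreThanTwoRepeats p || containsTwoRepeatsOnly p)
    = ((runLengths p).all (fun r => r < 3) || (runLengths p).any (fun r => r == 2)) := by
  have htl : p.toList ≠ [] := by
    intro h
    exact hne (by simpa using congrArg String.ofList h)
  cases hc : p.toList with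
  | nil => exact absurd hc htl
  | cons c rest =>
    simp only [containsMoreThanTwoRepeats, containsTwoRepeatsOnly, runLengths, hc]
    rw [pvLoopMore_eq rest c 0 (by omega) (by omega)]
    have hcto : (pvLoopOnly none 1 (c :: rest) == 2) = (pvRunsLoop c 1 rest).any (fun r => r == 2) := by
      simp only [pvLoopOnly]
      rw [if_neg (by simp), if_neg (by decide : ¬ (((1:Int) == 2) = true))]
      exact pvLoopOnly_eq rest c 1
    rw [hcto]
    rw [show (0:Int) + 1 = 1 from by norm_num]
    rw [not_any_ge_eq_all_lt]

-- ===== VERDICT (by name: the statement is the Claim_ definition above) =====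
theorem part_two_spec : Claim_equal_part_two := by
  intro passwords _ hpre
  unfold Spec_part_two part_two part_two_alt
  apply List.filter_congr
  intro p hp
  exact pred_eq p (hpre p hp)
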